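-- pv_equiv track=rewrite | github.com/taesookim0412/HappyClassifierModels_codesample | ModelWorkflows/vocab_preprocessor.py | build_vocab_from_tokenized_sentences_optimized
-- ===== SOURCE A (Python) =====
-- def build_vocab_from_tokenized_sentences_optimized(normalized_sentences_list: list[list[str]], specials: list[str] = ["<unk>"]):
--     word_frequencies = {}
--     specials_set = set(specials)
--     max_freq = -1
--     for sentence in normalized_sentences_list:
--         for word in sentence:
--             if word not in specials_set:
--                 word_frequencies[word] = word_frequencies.get(word, 0) + 1
--                 max_freq = max(max_freq, word_frequencies[word])
--     biggest_freq_after = max_freq + 1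
--     for special in reversed(specials):
--         word_frequencies[special] = biggest_freq_after
--         biggest_freq_after += 1
--
--     word_frequencies_sorted = {k: v for k, v in sorted(word_frequencies.items(), key=lambda x: (-x[1], x[0]))}
--     res = {}
--     for i, (word, freq) in enumerate(word_frequencies_sorted.items()):
--         res[word] = i
--     return res
-- ===== SOURCE B (Python) =====
-- def build_vocab_from_tokenized_sentences_optimized(normalized_sentences_list: list[list[str]], specials: list[str] = ["<unk>"]):
--     sp = set(specials)
--     tokens = [w for sentence in normalized_sentences_list for w in sentence if w not in sp]
--     freq = {}
--     for w in tokens: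
--         freq[w] = freq.get(w, 0) + 1
--     order = list(dict.fromkeys(specials)) + sorted(freq, key=lambda w: (-freq[w], w))
--     return {w: i for i, w in enumerate(order)}
-- ===== Notes on version B (the rewrite author's own statement) =====
-- stated objective: simpler
-- what changed: Instead of tracking max_freq and assigning synthetic decreasing frequencies to reversed specials before one big sort of the merged dict, B counts a flat filtered token stream, deduplicates specials by first occurrence, sorts only the regular words by (-freq, word), and enumerates the concatenation deduped_specials ++ sorted_regulars.
import Mathlib
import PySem

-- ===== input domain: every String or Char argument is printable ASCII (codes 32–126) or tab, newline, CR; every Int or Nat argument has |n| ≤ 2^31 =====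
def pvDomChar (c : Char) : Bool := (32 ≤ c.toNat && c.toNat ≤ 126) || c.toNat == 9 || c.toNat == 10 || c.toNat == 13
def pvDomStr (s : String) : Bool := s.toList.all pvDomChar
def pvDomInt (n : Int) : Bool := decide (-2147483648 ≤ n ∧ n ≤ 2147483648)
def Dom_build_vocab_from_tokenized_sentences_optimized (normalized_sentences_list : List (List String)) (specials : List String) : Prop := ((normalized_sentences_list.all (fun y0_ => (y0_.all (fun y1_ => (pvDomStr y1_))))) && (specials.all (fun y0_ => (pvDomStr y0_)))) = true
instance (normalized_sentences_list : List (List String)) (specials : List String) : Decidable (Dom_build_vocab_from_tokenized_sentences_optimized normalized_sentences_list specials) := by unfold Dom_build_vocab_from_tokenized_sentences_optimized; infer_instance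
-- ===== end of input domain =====

-- B replaces A's max_freq tracking and reversed synthetic-frequency trick by: count a flat
-- filtered token stream, dedup the specials, sort only the regular words, concatenate, enumerate
-- (objective: simpler; same return value, no observable argument mutation in either version).

-- ===== PORT A =====
def build_vocab_from_tokenized_sentences_optimized (normalized_sentences_list : List (List String)) (specials : List String) : List (String × Int) :=
  let specials_set : PySem.Set String := PySem.Set.ofList specials
  let st := normalized_sentences_list.foldl
    (fun (st : PySem.Dict String Int × Int) sentence =>
      sentence.foldl
        (fun (st : PySem.Dict String Int × Int) word =>
          if !(PySem.Set.contains specials_set word) then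
            (st.1.insert word (st.1.getD word 0 + 1),
             max st.2 ((st.1.insert word (st.1.getD word 0 + 1)).getD word 0))
          else st)
        st)
    (PySem.Dict.empty, -1)
  let st2 := specials.reverse.foldl
    (fun (st : PySem.Dict String Int × Int) special => (st.1.insert special st.2, st.2 + 1))
    (st.1, st.2 + 1)
  let word_frequencies_sorted : PySem.Dict String Int :=
    PySem.Dict.ofList (PySem.List.sorted2 st2.1.items (fun x => -x.2) (fun x => x.1))
  let res := (PySem.List.enumerate word_frequencies_sorted.items).foldl
    (fun (r : PySem.Dict String Int) p => r.insert p.2.1 p.1) PySem.Dict.empty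
  res.items

-- ===== PORT B =====
def build_vocab_from_tokenized_sentences_optimized_alt (normalized_sentences_list : List (List String)) (specials : List String) : List (String × Int) :=
  let sp : PySem.Set String := PySem.Set.ofList specials
  let tokens := normalized_sentences_list.flatMap
    (fun sentence => sentence.filter (fun w => !(PySem.Set.contains sp w)))
  let freq := tokens.foldl
    (fun (d : PySem.Dict String Int) w => d.insert w (d.getD w 0 + 1)) PySem.Dict.empty
  let order := PySem.List.dedup specials ++
    PySem.List.sorted2 freq.keys (fun w => -(freq.getD w 0)) (fun w => w)
  (PySem.Dict.ofList ((PySem.List.enumerate order).map (fun p => (p.2, p.1)))).items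

-- ===== PRECONDITION & SPEC =====
def Spec_build_vocab_from_tokenized_sentences_optimized (normalized_sentences_list : List (List String)) (specials : List String) (out : List (String × Int)) : Prop := out = build_vocab_from_tokenized_sentences_optimized_alt normalized_sentences_list specials
instance (normalized_sentences_list : List (List String)) (specials : List String) (out : List (String × Int)) : Decidable (Spec_build_vocab_from_tokenized_sentences_optimized normalized_sentences_list specials out) := by unfold Spec_build_vocab_from_tokenized_sentences_optimized; infer_instance

-- ===== CLAIM (what is proved, stated in full; the proofs are below) =====
def Claim_equal_build_vocab_from_tokenized_sentences_optimized : Prop := ∀ (normalized_sentences_list : List (List String)) (specials : List String), Dom_build_vocab_from_tokenized_sentences_optimized normalized_sentences_list specials → Spec_build_vocab_from_tokenized_sentences_optimized normalized_sentences_list specials (build_vocab_from_tokenized_sentences_optimized normalized_sentences_list specials)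

-- ===== LEMMAS AND PROOFS =====

-- A's counting loop over sentences with a membership test = the same loop over the flat filtered token stream
theorem pv_count_loop_flat (nsl : List (List String)) (sp : PySem.Set String)
    (init : PySem.Dict String Int × Int) :
    nsl.foldl
      (fun (st : PySem.Dict String Int × Int) sentence =>
        sentence.foldl
          (fun (st : PySem.Dict String Int × Int) word =>
            if !(PySem.Set.contains sp word) then
              (st.1.insert word (st.1.getD word 0 + 1),
               max st.2 ((st.1.insert word (st.1.getD word 0 + 1)).getD word 0))
            else st)
          st)
      init
    = (nsl.flatMap (fun sentence => sentence.filter (fun w => !(PySem.Set.contains sp w)))).foldl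
        (fun (st : PySem.Dict String Int × Int) word =>
          (st.1.insert word (st.1.getD word 0 + 1),
           max st.2 ((st.1.insert word (st.1.getD word 0 + 1)).getD word 0)))
        init := by
  simp only [List.flatMap_def, List.foldl_flatten, List.foldl_map, List.foldl_filter]

-- the dict component of A's (dict, max) counting fold is the plain counting fold
theorem pv_pair_fold_fst (tokens : List String) (d : PySem.Dict String Int) (m : Int) :
    (tokens.foldl
      (fun (st : PySem.Dict String Int × Int) word =>
        (st.1.insert word (st.1.getD word 0 + 1),
         max st.2 ((st.1.insert word (st.1.getD word 0 + 1)).getD word 0)))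
      (d, m)).1
    = tokens.foldl (fun (d : PySem.Dict String Int) w => d.insert w (d.getD w 0 + 1)) d := by
  induction tokens generalizing d m with
  | nil => rfl
  | cons t ts ih => simpa using ih _ _

-- the max component bounds every count stored in the dict component
theorem pv_pair_fold_bound (tokens : List String) (d : PySem.Dict String Int) (m : Int)
    (h : ∀ k ∈ d.keys, d.getD k 0 ≤ m) :
    ∀ k ∈ (tokens.foldl
      (fun (st : PySem.Dict String Int × Int) word =>
        (st.1.insert word (st.1.getD word 0 + 1),
         max st.2 ((st.1.insert word (st.1.getD word 0 + 1)).getD word 0)))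
      (d, m)).1.keys,
      (tokens.foldl
        (fun (st : PySem.Dict String Int × Int) word =>
          (st.1.insert word (st.1.getD word 0 + 1),
           max st.2 ((st.1.insert word (st.1.getD word 0 + 1)).getD word 0)))
        (d, m)).1.getD k 0
      ≤ (tokens.foldl
          (fun (st : PySem.Dict String Int × Int) word =>
            (st.1.insert word (st.1.getD word 0 + 1),
             max st.2 ((st.1.insert word (st.1.getD word 0 + 1)).getD word 0)))
          (d, m)).2 := by
  induction tokens generalizing d m with
  | nil => simpa using h
  | cons t ts ih =>
    simp only [List.foldl_cons]
    refine ih _ _ (fun k hk => ?_)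
    rw [PySem.Dict.getD_insert_self]
    rw [PySem.Dict.getD_insert]
    by_cases he : k = t
    · rw [if_pos he]; exact le_max_right _ _
    · rw [if_neg he]
      rcases (PySem.Dict.mem_keys_insert d t k _).1 hk with h1 | h1
      · exact absurd h1 he
      · exact le_trans (h k h1) (le_max_left _ _)

-- the running value of A's specials loop
theorem pv_sp_fold_snd (l : List String) (d : PySem.Dict String Int) (b : Int) :
    (l.foldl
      (fun (st : PySem.Dict String Int × Int) special => (st.1.insert special st.2, st.2 + 1))
      (d, b)).2 = b + l.length := by
  induction l generalizing d b with
  | nil => simp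
  | cons x xs ih =>
    simp only [List.foldl_cons, List.length_cons, ih]
    push_cast
    ring

theorem pv_keys_insert_add (d : PySem.Dict String Int) (k : String) (v : Int) :
    (d.insert k v).keys = PySem.Set.add d.keys k := by
  by_cases h : d.contains k = true
  · rw [PySem.Dict.keys_insert_of_contains d v h]
    unfold PySem.Set.add
    rw [if_pos]
    rw [PySem.Set.contains_iff]
    exact (PySem.Dict.contains_iff_mem_keys d k).1 h
  · rw [PySem.Dict.keys_insert_of_not_contains d v (by simpa using h)]
    unfold PySem.Set.add
    rw [if_neg]
    rw [PySem.Set.contains_iff]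
    intro hm
    exact h ((PySem.Dict.contains_iff_mem_keys d k).2 hm)

theorem pv_sp_fold_keys (l : List String) (d : PySem.Dict String Int) (b : Int) :
    (l.foldl
      (fun (st : PySem.Dict String Int × Int) special => (st.1.insert special st.2, st.2 + 1))
      (d, b)).1.keys = PySem.Set.update d.keys l := by
  induction l generalizing d b with
  | nil => rfl
  | cons x xs ih =>
    rw [PySem.Set.update_eq_foldl]
    simp only [List.foldl_cons]
    rw [← PySem.Set.update_eq_foldl, ← pv_keys_insert_add d x b]
    exact ih _ _

-- the first-occurrence (key, final synthetic frequency) table A's reversed specials loop produces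
def specH : List String → Int → List (String × Int)
  | [], _ => []
  | s :: rest, b => (s, b + rest.length) :: (specH rest b).filter (fun p => p.1 != s)

theorem pv_map_fst_filter_ne (l : List (String × Int)) (s : String) :
    (l.filter (fun p => p.1 != s)).map Prod.fst = (l.map Prod.fst).filter (fun z => z != s) := by
  induction l with
  | nil => rfl
  | cons p ps ih =>
    by_cases h : p.1 = s
    · simp [h, ih]
    · simp [h, ih]

theorem pv_dedup_cons (y : String) (ys : List String) :
    PySem.List.dedup (y :: ys) = y :: (PySem.List.dedup ys).filter (fun z => z != y) := by
  rw [PySem.List.dedup_eq_ofList, PySem.Set.ofList_cons_eq_update,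
    PySem.Set.update_eq_append_filter, PySem.List.dedup_eq_ofList]
  simp only [List.singleton_append, List.cons.injEq, true_and]
  refine List.filter_congr (fun z _ => ?_)
  by_cases h : z = y
  · subst h; simp
  · simp [h]

theorem pv_specH_fst (l : List String) (b : Int) :
    (specH l b).map Prod.fst = PySem.List.dedup l := by
  induction l with
  | nil => rfl
  | cons s rest ih =>
    rw [pv_dedup_cons]
    simp only [specH, List.map_cons, pv_map_fst_filter_ne, ih]

theorem pv_specH_ge (l : List String) (b : Int) : ∀ p ∈ specH l b, b ≤ p.2 := by
  induction l with
  | nil => intro p hp; cases hp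
  | cons s rest ih =>
    intro p hp
    rcases List.mem_cons.1 hp with hp | hp
    · subst hp
      show b ≤ b + (rest.length : Int)
      omega
    · exact ih p (List.mem_of_mem_filter hp)

theorem pv_specH_lt (l : List String) (b : Int) : ∀ p ∈ specH l b, p.2 < b + l.length := by
  induction l with
  | nil => intro p hp; cases hp
  | cons s rest ih =>
    intro p hp
    simp only [List.length_cons]
    rcases List.mem_cons.1 hp with hp | hp
    · subst hp
      show b + (rest.length : Int) < b + ((rest.length + 1 : Nat) : Int)
      push_cast
      omega
    · have h2 := ih p (List.mem_of_mem_filter hp)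
      push_cast
      push_cast at h2
      omega

theorem pv_specH_pair (l : List String) (b : Int) :
    (specH l b).Pairwise (fun p q => q.2 < p.2) := by
  induction l with
  | nil => exact List.Pairwise.nil
  | cons s rest ih =>
    refine List.Pairwise.cons (fun q hq => ?_) (List.Pairwise.filter _ ih)
    exact pv_specH_lt rest b q (List.mem_of_mem_filter hq)

theorem pv_sp_fold_getD_mem (specials : List String) (d : PySem.Dict String Int) (b : Int) :
    ∀ p ∈ specH specials b,
      ((specials.reverse.foldl
        (fun (st : PySem.Dict String Int × Int) special => (st.1.insert special st.2, st.2 + 1))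
        (d, b)).1).getD p.1 0 = p.2 := by
  induction specials generalizing d with
  | nil => intro p hp; cases hp
  | cons s rest ih =>
    intro p hp
    rw [List.reverse_cons, List.foldl_append]
    simp only [List.foldl_cons, List.foldl_nil]
    have hsnd := pv_sp_fold_snd rest.reverse d b
    rcases List.mem_cons.1 hp with hp | hp
    · subst hp
      dsimp only
      rw [PySem.Dict.getD_insert_self, hsnd, List.length_reverse]
    · have hne : p.1 ≠ s := by
        have := (List.mem_filter.1 hp).2
        simpa using this
      rw [PySem.Dict.getD_insert, if_neg hne]
      exact ih d p (List.mem_of_mem_filter hp)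

theorem pv_sp_fold_getD_notmem (specials : List String) (d : PySem.Dict String Int) (b : Int)
    (k : String) (hk : k ∉ specials) :
    ((specials.reverse.foldl
      (fun (st : PySem.Dict String Int × Int) special => (st.1.insert special st.2, st.2 + 1))
      (d, b)).1).getD k 0 = d.getD k 0 := by
  induction specials generalizing d with
  | nil => rfl
  | cons s rest ih =>
    rw [List.reverse_cons, List.foldl_append]
    simp only [List.foldl_cons, List.foldl_nil]
    rw [PySem.Dict.getD_insert, if_neg (fun h => hk (by simp [h]))]
    exact ih _ (fun h => hk (List.mem_cons_of_mem _ h))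

-- Python's tuple-key sort is the sort by the lexicographic key
theorem pv_sorted2_eq_sorted_lex {α : Type} (xs : List α) (k1 : α → Int) (k2 : α → String) :
    PySem.List.sorted2 xs k1 k2 = PySem.List.sorted xs (fun x => toLex (k1 x, k2 x)) := by
  rw [PySem.List.sorted_eq_foldl_insertBy]
  simp only [PySem.List.sorted2, if_neg (by simp : ¬ (false = true))]
  congr 1
  funext acc x
  congr 1
  funext a b
  rw [Bool.eq_iff_iff]
  simp only [Bool.or_eq_true, Bool.and_eq_true, Bool.not_eq_eq_eq_not, Bool.not_true,
    decide_eq_true_eq, decide_eq_false_iff_not, Prod.Lex.lt_iff, ofLex_toLex]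
  rcases lt_trichotomy (k1 a) (k1 b) with h | h | h
  · simp [h]
  · simp [h]
  · simp only [h.ne', not_lt_of_gt h, false_and, false_or, or_false, iff_false]
    intro hc
    exact absurd h hc.1

theorem pv_enumerate_map {α β : Type} (g : α → β) (l : List α) (s : Int) :
    PySem.List.enumerate (l.map g) s = (PySem.List.enumerate l s).map (fun p => (p.1, g p.2)) := by
  induction l generalizing s with
  | nil => rfl
  | cons x xs ih => simp [PySem.List.enumerate_cons, ih]

theorem pv_items_ofList_fresh (ps : List (String × Int)) (h : (ps.map Prod.fst).Nodup) :
    (PySem.Dict.ofList ps).items = ps := by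
  show ((PySem.Dict.empty : PySem.Dict String Int).update ps).items = ps
  unfold PySem.Dict.update
  rw [PySem.Dict.items_foldl_insert_fresh ps Prod.fst Prod.snd PySem.Dict.empty
    (fun a _ => by simp) h]
  rw [show (PySem.Dict.empty : PySem.Dict String Int).items = [] from rfl]
  simp

-- ===== VERDICT (by name: the statement is the Claim_ definition above) =====
theorem build_vocab_from_tokenized_sentences_optimized_spec : Claim_equal_build_vocab_from_tokenized_sentences_optimized := by
  intro nsl specials _
  unfold Spec_build_vocab_from_tokenized_sentences_optimized
  set sp : PySem.Set String := PySem.Set.ofList specials with hsp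
  set tokens : List String :=
    nsl.flatMap (fun sentence => sentence.filter (fun w => !(PySem.Set.contains sp w))) with htokens
  set d : PySem.Dict String Int := PySem.Dict.counter tokens with hd
  set R : PySem.Dict String Int × Int := tokens.foldl
      (fun (st : PySem.Dict String Int × Int) word =>
        (st.1.insert word (st.1.getD word 0 + 1),
         max st.2 ((st.1.insert word (st.1.getD word 0 + 1)).getD word 0)))
      (PySem.Dict.empty, -1) with hR
  set wf2 : PySem.Dict String Int := (specials.reverse.foldl
      (fun (st : PySem.Dict String Int × Int) special => (st.1.insert special st.2, st.2 + 1))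
      (R.1, R.2 + 1)).1 with hwf2
  set L : List String := PySem.List.dedup specials ++
      PySem.List.sorted2 d.keys (fun w => -(d.getD w 0)) (fun w => w) with hL
  set T : List (String × Int) := specH specials (R.2 + 1) ++
      (PySem.List.sorted2 d.keys (fun w => -(d.getD w 0)) (fun w => w)).map
        (fun w => (w, d.getD w 0)) with hT
  -- basic facts
  have hdk : d.keys = PySem.Set.ofList tokens := by
    rw [hd]; exact PySem.Dict.keys_counter tokens
  have hdknd : d.keys.Nodup := by
    rw [hd]; exact PySem.Dict.nodup_keys_counter tokens
  have hdisj : ∀ x ∈ d.keys, x ∉ specials := by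
    intro x hx hxs
    rw [hdk, PySem.Set.mem_ofList, htokens] at hx
    rcases List.mem_flatMap.1 hx with ⟨s, _, hs⟩
    have hc := (List.mem_filter.1 hs).2
    have hcc : ¬ (PySem.Set.contains sp x = true) := by simpa using hc
    refine hcc ?_
    rw [PySem.Set.contains_iff, hsp, PySem.Set.mem_ofList]
    exact hxs
  have hR1 : R.1 = d := by
    rw [hR, pv_pair_fold_fst, PySem.Dict.foldl_insert_getD_add_one_eq_counter]
  have hbound : ∀ k ∈ d.keys, d.getD k 0 ≤ R.2 := by
    have h0 : ∀ k ∈ (PySem.Dict.empty : PySem.Dict String Int).keys,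
        (PySem.Dict.empty : PySem.Dict String Int).getD k 0 ≤ (-1 : Int) := by
      intro k hk
      simp [PySem.Dict.keys, PySem.Dict.empty] at hk
    have hb := pv_pair_fold_bound tokens PySem.Dict.empty (-1) h0
    rw [← hR, hR1] at hb
    exact hb
  -- the specials loop
  have hkeys : wf2.keys = PySem.Set.update d.keys specials.reverse := by
    have h1 := pv_sp_fold_keys specials.reverse R.1 (R.2 + 1)
    rw [← hwf2, hR1] at h1
    exact h1
  have hknd : wf2.keys.Nodup := by
    rw [hkeys]; exact PySem.Set.nodup_update _ _ hdknd
  have hgdH : ∀ p ∈ specH specials (R.2 + 1), wf2.getD p.1 0 = p.2 := by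
    have h1 := pv_sp_fold_getD_mem specials R.1 (R.2 + 1)
    rw [← hwf2] at h1
    exact h1
  have hgdR : ∀ k, k ∉ specials → wf2.getD k 0 = d.getD k 0 := by
    intro k hk
    have h1 := pv_sp_fold_getD_notmem specials R.1 (R.2 + 1) k hk
    rw [← hwf2, hR1] at h1
    exact h1
  -- the canonical ordered key list
  have hsnd2 : (PySem.List.sorted2 d.keys (fun w => -(d.getD w 0)) (fun w => w)).Nodup :=
    (PySem.List.sorted2_perm _ _ _ _).symm.nodup hdknd
  have hLnd : L.Nodup := by
    rw [hL]
    refine List.Nodup.append ?_ hsnd2 ?_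
    · rw [PySem.List.dedup_eq_ofList]; exact PySem.Set.nodup_ofList specials
    · intro a ha hb
      exact hdisj a ((PySem.List.sorted2_perm _ _ _ _).mem_iff.1 hb) ((PySem.List.mem_dedup _ _).1 ha)
  have hTfst : T.map Prod.fst = L := by
    rw [hT, hL, List.map_append, pv_specH_fst, List.map_map]
    congr 1
    exact (List.map_congr_left (fun a _ => rfl)).trans (List.map_id _)
  have hTmap : T = L.map (fun k => (k, wf2.getD k 0)) := by
    rw [hT, hL, List.map_append]
    congr 1
    · rw [← pv_specH_fst specials (R.2 + 1), List.map_map]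
      symm
      refine (List.map_congr_left ?_).trans (List.map_id _)
      intro p hp
      simp only [Function.comp_apply, id_eq]
      rw [hgdH p hp]
    · refine List.map_congr_left (fun w hw => ?_)
      have hwk : w ∈ d.keys := (PySem.List.sorted2_perm _ _ _ _).mem_iff.1 hw
      rw [hgdR w (fun hc => hdisj w hwk hc)]
  have hitems : wf2.items = wf2.keys.map (fun k => (k, wf2.getD k 0)) :=
    PySem.Dict.items_eq_map_keys wf2 hknd 0
  have hLperm : L.Perm wf2.keys := by
    refine (List.perm_ext_iff_of_nodup hLnd hknd).2 (fun x => ?_)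
    rw [hkeys]
    simp only [hL, List.mem_append, PySem.List.mem_dedup, PySem.Set.mem_update,
      List.mem_reverse, (PySem.List.sorted2_perm _ _ _ _).mem_iff]
    tauto
  have hperm : T.Perm wf2.items := by
    rw [hTmap, hitems]
    exact hLperm.map _
  -- strict ordering of T under the lexicographic sort key
  have hpair : T.Pairwise (fun x y : String × Int => toLex (-x.2, x.1) < toLex (-y.2, y.1)) := by
    rw [hT]
    refine List.pairwise_append.2 ⟨?_, ?_, ?_⟩
    · refine (pv_specH_pair specials (R.2 + 1)).imp ?_
      intro p q h
      refine Prod.Lex.lt_iff.2 (Or.inl ?_)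
      show -p.2 < -q.2
      omega
    · refine List.pairwise_map.mpr ?_
      have hle : (PySem.List.sorted2 d.keys (fun w => -(d.getD w 0)) (fun w => w)).Pairwise
          (fun a b => (fun w => toLex (-(d.getD w 0), w)) a ≤ (fun w => toLex (-(d.getD w 0), w)) b) := by
        rw [pv_sorted2_eq_sorted_lex]
        exact PySem.List.sorted_pairwise d.keys (fun w => toLex (-(d.getD w 0), w))
      refine (hle.and (hsnd2 : (PySem.List.sorted2 d.keys (fun w => -(d.getD w 0)) (fun w => w)).Pairwise (· ≠ ·))).imp ?_
      intro a b hab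
      refine lt_of_le_of_ne hab.1 (fun hEq => hab.2 ?_)
      simpa using congrArg (fun z => (ofLex z).2) hEq
    · intro p hp q hq
      rcases List.mem_map.1 hq with ⟨w, hw, rfl⟩
      have h1 := pv_specH_ge specials (R.2 + 1) p hp
      have h2 := hbound w ((PySem.List.sorted2_perm _ _ _ _).mem_iff.1 hw)
      refine Prod.Lex.lt_iff.2 (Or.inl ?_)
      show -p.2 < -(d.getD w 0)
      omega
  -- the sort in A produces exactly T
  have hsorted : PySem.List.sorted2 wf2.items (fun x => -x.2) (fun x => x.1) = T := by
    rw [pv_sorted2_eq_sorted_lex]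
    exact PySem.List.sorted_eq_of_perm_of_pairwise_lt _ _ _ hperm hpair
  have hTnd : (T.map Prod.fst).Nodup := by rw [hTfst]; exact hLnd
  -- A's result
  have hAres : ((PySem.List.enumerate T).foldl
      (fun (r : PySem.Dict String Int) p => r.insert p.2.1 p.1) PySem.Dict.empty).items
      = (PySem.List.enumerate T).map (fun p => (p.2.1, p.1)) := by
    have hnd : ((PySem.List.enumerate T).map (fun p => p.2.1)).Nodup := by
      have h1 : (PySem.List.enumerate T).map (fun p => p.2.1)
          = ((PySem.List.enumerate T).map (fun p => p.2)).map (fun q => q.1) := by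
        rw [List.map_map]
        rfl
      rw [h1, PySem.List.map_snd_enumerate]
      exact hTnd
    rw [PySem.Dict.items_foldl_insert_fresh (PySem.List.enumerate T)
      (fun p : Int × String × Int => p.2.1) (fun p : Int × String × Int => p.1)
      PySem.Dict.empty (fun a _ => by simp) hnd]
    rw [show (PySem.Dict.empty : PySem.Dict String Int).items = [] from rfl]
    simp
  have hAeq : build_vocab_from_tokenized_sentences_optimized nsl specials
      = (PySem.List.enumerate T).map (fun p => (p.2.1, p.1)) := by
    unfold build_vocab_from_tokenized_sentences_optimized
    dsimp only
    rw [← hsp, pv_count_loop_flat, ← htokens, ← hR, ← hwf2, hsorted,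
      pv_items_ofList_fresh T hTnd]
    exact hAres
  -- B's result
  have hBnd : ((((PySem.List.enumerate L).map (fun p => (p.2, p.1)))).map Prod.fst).Nodup := by
    rw [List.map_map]
    have h1 : (Prod.fst ∘ fun (p : Int × String) => (p.2, p.1)) = fun p => p.2 := rfl
    rw [h1, PySem.List.map_snd_enumerate]
    exact hLnd
  have hBeq : build_vocab_from_tokenized_sentences_optimized_alt nsl specials
      = (PySem.List.enumerate L).map (fun p => (p.2, p.1)) := by
    unfold build_vocab_from_tokenized_sentences_optimized_alt
    dsimp only
    rw [← hsp, ← htokens, PySem.Dict.foldl_insert_getD_add_one_eq_counter, ← hd, ← hL]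
    exact pv_items_ofList_fresh _ hBnd
  rw [hAeq, hBeq, ← hTfst, pv_enumerate_map, List.map_map]
  rfl
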